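-- pv_equiv track=rewrite | github.com/roymodi/Stock | darvasbox.py | chake_wkday
-- ===== SOURCE A (Python) =====
-- def chake_wkday(lis, day):  # get days in two list uncomon days
--     wk = ['Friday', 'Saturday', 'Sunday', 'Monday', 'Tuesday', 'Wednesday', 'Thursday']
--     li = []
--     # li.clear()
--     for x in wk:
--         if x not in lis:
--             li.append(x)
--             if x == day:
--                 break
--     return li
-- ===== SOURCE B (Python) =====
-- def chake_wkday(lis, day):
--     wk = ['Friday', 'Saturday', 'Sunday', 'Monday', 'Tuesday', 'Wednesday', 'Thursday']
--     missing = [x for x in wk if x not in lis]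
--     if day in missing:
--         return missing[:missing.index(day) + 1]
--     return missing
-- ===== Notes on version B (the rewrite author's own statement) =====
-- stated objective: simpler
-- what changed: Filters the whole weekday list first and only then truncates the already-filtered list at day's position, so A's in-loop break and its compound guard (day a weekday and not excluded) collapse into a single membership test on the filtered result.
import Mathlib
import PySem

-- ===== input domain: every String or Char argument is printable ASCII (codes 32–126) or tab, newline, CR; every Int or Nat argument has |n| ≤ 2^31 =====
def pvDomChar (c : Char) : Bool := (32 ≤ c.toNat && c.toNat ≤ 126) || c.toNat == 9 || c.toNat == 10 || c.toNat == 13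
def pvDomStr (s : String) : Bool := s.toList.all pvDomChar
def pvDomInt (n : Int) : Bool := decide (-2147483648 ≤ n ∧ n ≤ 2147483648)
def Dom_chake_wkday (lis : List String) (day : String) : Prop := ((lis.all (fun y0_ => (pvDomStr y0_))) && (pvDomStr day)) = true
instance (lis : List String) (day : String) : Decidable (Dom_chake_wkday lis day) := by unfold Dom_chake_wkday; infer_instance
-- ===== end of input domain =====

-- B filters the whole weekday list first and only then truncates the filtered
-- list at day's position, replacing A's single pass with an in-loop break and
-- its compound guard; objective: simpler decomposition, same cost.


-- ===== PORT A =====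
-- the for-loop with its `break`, over accumulator li
def chakeWkdayLoop (lis : List String) (day : String) : List String → List String → List String
  | [], li => li
  | x :: rest, li =>
    if lis.contains x then chakeWkdayLoop lis day rest li
    else if x == day then li ++ [x]
    else chakeWkdayLoop lis day rest (li ++ [x])

def chake_wkday (lis : List String) (day : String) : List String :=
  chakeWkdayLoop lis day
    ["Friday", "Saturday", "Sunday", "Monday", "Tuesday", "Wednesday", "Thursday"] []

-- ===== PORT B =====
def chake_wkday_alt (lis : List String) (day : String) : List String :=
  let wk := ["Friday", "Saturday", "Sunday", "Monday", "Tuesday", "Wednesday", "Thursday"]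
  let missing := wk.filter (fun x => !lis.contains x)     -- [x for x in wk if x not in lis]
  if missing.contains day then
    match PySem.List.index? missing day with              -- missing.index(day); some, since day in missing
    | some i => missing.take (i + 1)                      -- missing[:missing.index(day)+1]
    | none => missing
  else missing

-- ===== PRECONDITION & SPEC =====
def Spec_chake_wkday (lis : List String) (day : String) (out : List String) : Prop := out = chake_wkday_alt lis day
instance (lis : List String) (day : String) (out : List String) : Decidable (Spec_chake_wkday lis day out) := by unfold Spec_chake_wkday; infer_instance

-- ===== CLAIM (what is proved, stated in full; the proofs are below) =====
def Claim_equal_chake_wkday : Prop := ∀ (lis : List String) (day : String), Dom_chake_wkday lis day → Spec_chake_wkday lis day (chake_wkday lis day)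

-- ===== LEMMAS AND PROOFS =====

-- truncation at day's first occurrence (inclusive); the whole list if day absent
def cutAt (day : String) (wk : List String) : List String :=
  match PySem.List.index? wk day with
  | some i => wk.take (i + 1)
  | none => wk

-- when day is in lis the break never fires: the loop filters the whole list
lemma loop_contains (lis : List String) (day : String) (hc : day ∈ lis) :
    ∀ (wk li : List String),
      chakeWkdayLoop lis day wk li = li ++ wk.filter (fun x => !lis.contains x) := by
  intro wk
  induction wk with
  | nil => intro li; simp [chakeWkdayLoop]
  | cons x rest ih =>
    intro li
    by_cases hx : x ∈ lis
    · simp [chakeWkdayLoop, hx, ih]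
    · have hxd : x ≠ day := fun h => hx (h ▸ hc)
      simp [chakeWkdayLoop, hx, hxd, ih]

lemma cutAt_cons_self (day : String) (rest : List String) :
    cutAt day (day :: rest) = [day] := by
  unfold cutAt; rw [PySem.List.index?_cons_self]; rfl

lemma cutAt_cons_of_ne (day x : String) (rest : List String) (hxd : x ≠ day) :
    cutAt day (x :: rest) = x :: cutAt day rest := by
  unfold cutAt
  rw [PySem.List.index?_cons_of_ne rest hxd]
  cases PySem.List.index? rest day <;> simp [List.take_succ_cons]

-- when day is not in lis the loop breaks at day's first occurrence: it filters the prefix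
lemma loop_free (lis : List String) (day : String) (hc : day ∉ lis) :
    ∀ (wk li : List String),
      chakeWkdayLoop lis day wk li = li ++ (cutAt day wk).filter (fun x => !lis.contains x) := by
  intro wk
  induction wk with
  | nil => intro li; simp [chakeWkdayLoop, cutAt, PySem.List.index?]
  | cons x rest ih =>
    intro li
    by_cases hxd : x = day
    · subst hxd
      rw [cutAt_cons_self]
      simp [chakeWkdayLoop, hc]
    · rw [cutAt_cons_of_ne day x rest hxd]
      by_cases hx : x ∈ lis
      · simp [chakeWkdayLoop, hx, ih]
      · simp [chakeWkdayLoop, hx, hxd, ih]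

-- truncation at day commutes with a filter that keeps day
lemma cutAt_filter (lis : List String) (day : String) (hc : day ∉ lis) :
    ∀ wk : List String,
      cutAt day (wk.filter (fun x => !lis.contains x))
        = (cutAt day wk).filter (fun x => !lis.contains x) := by
  intro wk
  induction wk with
  | nil => simp [cutAt, PySem.List.index?]
  | cons x rest ih =>
    by_cases hxd : x = day
    · subst hxd
      have h1 : (x :: rest).filter (fun y => !lis.contains y)
          = x :: rest.filter (fun y => !lis.contains y) := by simp [hc]
      rw [h1, cutAt_cons_self, cutAt_cons_self]
      simp [hc]
    · rw [cutAt_cons_of_ne day x rest hxd]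
      by_cases hx : x ∈ lis
      · have h1 : (x :: rest).filter (fun y => !lis.contains y)
            = rest.filter (fun y => !lis.contains y) := by simp [hx]
        have h2 : (x :: cutAt day rest).filter (fun y => !lis.contains y)
            = (cutAt day rest).filter (fun y => !lis.contains y) := by simp [hx]
        rw [h1, h2, ih]
      · have h1 : (x :: rest).filter (fun y => !lis.contains y)
            = x :: rest.filter (fun y => !lis.contains y) := by simp [hx]
        have h2 : (x :: cutAt day rest).filter (fun y => !lis.contains y)
            = x :: (cutAt day rest).filter (fun y => !lis.contains y) := by simp [hx]
        rw [h1, h2, cutAt_cons_of_ne day x _ hxd, ih]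

-- ===== VERDICT (by name: the statement is the Claim_ definition above) =====
theorem chake_wkday_spec : Claim_equal_chake_wkday := by
  intro lis day _
  unfold Spec_chake_wkday chake_wkday
  set wk : List String := ["Friday", "Saturday", "Sunday", "Monday", "Tuesday", "Wednesday", "Thursday"] with hwk
  set missing := wk.filter (fun x => !lis.contains x) with hmdef
  have halt : chake_wkday_alt lis day
      = (if missing.contains day then cutAt day missing else missing) := rfl
  rw [halt]
  by_cases hc : day ∈ lis
  · rw [loop_contains lis day hc wk []]
    have hg : missing.contains day = false := by
      simp [hmdef, List.mem_filter, hc]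
    simp [hmdef]
    intro _ h2
    exact absurd hc h2
  · rw [loop_free lis day hc wk []]
    by_cases hm : day ∈ missing
    · have hg : missing.contains day = true := by simpa using hm
      rw [if_pos hg, hmdef, cutAt_filter lis day hc wk]
      simp
    · have hg : missing.contains day = false := by simpa using hm
      have hdw : day ∉ wk := by
        intro hdwk
        exact hm (by simp [hmdef, List.mem_filter, hdwk, hc])
      have hn : PySem.List.index? wk day = none := (PySem.List.index?_eq_none_iff wk day).mpr hdw
      rw [show cutAt day wk = wk from by unfold cutAt; rw [hn]]
      simp [hmdef]
      intro h1 _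
      exact absurd h1 hdw
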